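-- pv_equiv track=rewrite | github.com/MrFork27/my-codewars | python/5_kyu/Weight_for_weight/MrFork27.py | order_weight
-- ===== SOURCE A (Python) =====
-- def order_weight(string):
--     weights = sorted(string.strip().split())
--     formatted_weights = {
--         idx: sum(int(digit) for digit in weight) for idx, weight in enumerate(weights)
--     }
--     ordered_weights = {
--         key: value
--         for key, value in sorted(formatted_weights.items(), key=lambda item: item[1])
--     }
--
--     return " ".join(weights[key] for key in ordered_weights).strip()
-- ===== SOURCE B (Python) =====
-- def order_weight(string):
--     buckets = {}
--     for w in string.split():
--         s = sum(int(d) for d in w)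
--         buckets.setdefault(s, []).append(w)
--     out = []
--     for s in sorted(buckets):
--         out += sorted(buckets[s])
--     return " ".join(out)
-- ===== Notes on version B (the rewrite author's own statement) =====
-- stated objective: alternative
-- what changed: Replaces A's lexicographic pre-sort plus index-dict bookkeeping and a second sort of dict items by a single pass that groups weights into a digit-sum-keyed bucket dict, then emits each bucket lexicographically sorted in increasing digit-sum order.
import Mathlib
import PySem

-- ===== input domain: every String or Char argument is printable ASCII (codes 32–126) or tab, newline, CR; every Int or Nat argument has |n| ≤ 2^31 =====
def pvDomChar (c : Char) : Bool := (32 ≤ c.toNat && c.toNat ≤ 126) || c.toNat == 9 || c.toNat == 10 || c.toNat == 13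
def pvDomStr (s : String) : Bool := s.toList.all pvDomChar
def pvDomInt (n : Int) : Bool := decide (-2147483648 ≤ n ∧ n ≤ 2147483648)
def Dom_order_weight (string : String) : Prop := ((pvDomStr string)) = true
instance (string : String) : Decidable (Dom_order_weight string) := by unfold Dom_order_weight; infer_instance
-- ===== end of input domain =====

-- B groups the weights by digit sum in one dict-building pass and emits the buckets in
-- increasing digit-sum order, each sorted lexicographically, instead of A's lexicographic
-- pre-sort plus index dict and second sort of the dict items (objective: alternative).

-- ===== PORT A =====
-- sum(int(digit) for digit in weight); the .getD 0 is unreachable under Pre_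
-- (every char is an ASCII digit, so int(digit) = PySem.Int.ofChars? [c] = some _).
def pvDigitSum (w : String) : Int :=
  (w.toList.map (fun c => (PySem.Int.ofChars? [c]).getD 0)).sum

def order_weight (string : String) : String :=
  let weights := PySem.List.sorted (PySem.Str.split₀ (PySem.Str.strip string)) id
  let formatted := (PySem.List.enumerate weights).foldl
      (fun d p => d.insert p.1 (pvDigitSum p.2)) (PySem.Dict.empty : PySem.Dict Int Int)
  let ordered := (PySem.List.sorted formatted.items (fun it => it.2)).foldl
      (fun d kv => d.insert kv.1 kv.2) (PySem.Dict.empty : PySem.Dict Int Int)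
  -- " ".join(weights[key] for key in ordered_weights); the .getD "" is unreachable
  -- (every key of `ordered` is a valid index into weights).
  PySem.Str.strip (PySem.Str.join " "
    (ordered.keys.map (fun k => (PySem.List.pyGet? weights k).getD "")))

-- ===== PORT B =====
def order_weight_alt (string : String) : String :=
  let buckets := (PySem.Str.split₀ string).foldl
      (fun d w => d.modify (pvDigitSum w) [] (fun l => l ++ [w]))
      (PySem.Dict.empty : PySem.Dict Int (List String))
  let out := (PySem.List.sorted buckets.keys id).foldl
      -- buckets[s]: the key s always comes from buckets, so .getD [] is never the default
      (fun acc s => acc ++ PySem.List.sorted (buckets.getD s []) id) ([] : List String)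
  PySem.Str.join " " out

-- ===== PRECONDITION & SPEC =====
-- Pre_ excludes exactly the inputs where A raises ValueError: a token containing a
-- non-digit character makes int(digit) raise inside A's digit-sum comprehension.
def Pre_order_weight (string : String) : Prop :=
  (PySem.Str.split₀ string).all (fun t => PySem.Str.strIsdigit t) = true
instance (string : String) : Decidable (Pre_order_weight string) := by
  unfold Pre_order_weight; infer_instance

def pvWitness_order_weight : String := "56 65 74 100 99 68 86 180 90"

def Spec_order_weight (string : String) (out : String) : Prop := out = order_weight_alt string
instance (string : String) (out : String) : Decidable (Spec_order_weight string out) := by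
  unfold Spec_order_weight; infer_instance

-- ===== CLAIM (what is proved, stated in full; the proofs are below) =====
def Claim_equal_order_weight : Prop := ∀ (string : String), Dom_order_weight string → Pre_order_weight string → Spec_order_weight string (order_weight string)

-- ===== LEMMAS AND PROOFS =====

-- x goes to the very front of acc when it is strictly below everything in acc
theorem pv_insertBy_head {α κ : Type} [LinearOrder κ] (key : α → κ) (x : α) (acc : List α)
    (h : ∀ b ∈ acc, key x < key b) :
    PySem.List.insertBy (fun a b => decide (key a < key b)) x acc = x :: acc := by
  cases acc with
  | nil => rfl
  | cons a as => simp [PySem.List.insertBy, h a (by simp)]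

-- filter commutes with a single stable insertion into a sorted accumulator
theorem pv_insertBy_filter {α κ : Type} [LinearOrder κ] (key : α → κ) (p : α → Bool)
    (x : α) (acc : List α) (hs : acc.Pairwise (fun a b => key a ≤ key b)) :
    (PySem.List.insertBy (fun a b => decide (key a < key b)) x acc).filter p
      = if p x then PySem.List.insertBy (fun a b => decide (key a < key b)) x (acc.filter p)
        else acc.filter p := by
  induction acc with
  | nil => simp [PySem.List.insertBy]; split <;> simp_all
  | cons a as ih =>
    rcases List.pairwise_cons.mp hs with ⟨ha, has⟩
    by_cases hlt : key x < key a
    · rw [show PySem.List.insertBy (fun a b => decide (key a < key b)) x (a :: as) = x :: a :: as by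
        simp [PySem.List.insertBy, hlt]]
      by_cases hp : p x = true
      · by_cases hpa : p a = true
        · simp [List.filter, hp, hpa, PySem.List.insertBy, hlt]
        · simp only [List.filter_cons, hp, hpa, if_pos, Bool.false_eq_true, if_false, if_true]
          rw [pv_insertBy_head key x]
          · intro b hb
            have hb' := List.mem_filter.mp hb
            exact lt_of_lt_of_le hlt (ha b hb'.1)
      · simp [List.filter_cons, hp]
    · rw [show PySem.List.insertBy (fun a b => decide (key a < key b)) x (a :: as)
          = a :: PySem.List.insertBy (fun a b => decide (key a < key b)) x as by
        simp [PySem.List.insertBy, hlt]]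
      by_cases hpa : p a = true
      · simp only [List.filter_cons, hpa, if_pos]
        rw [ih has]
        by_cases hp : p x = true
        · simp only [if_pos hp]
          rw [show PySem.List.insertBy (fun a b => decide (key a < key b)) x (a :: as.filter p)
              = a :: PySem.List.insertBy (fun a b => decide (key a < key b)) x (as.filter p) by
            simp [PySem.List.insertBy, hlt]]
        · simp [hp]
      · simp only [List.filter_cons, hpa, Bool.false_eq_true, if_false]
        rw [ih has]

theorem pv_foldl_filter {α κ : Type} [LinearOrder κ] (key : α → κ) (p : α → Bool)
    (l acc : List α) (hs : acc.Pairwise (fun a b => key a ≤ key b)) :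
    (l.foldl (fun acc x => PySem.List.insertBy (fun a b => decide (key a < key b)) x acc) acc).filter p
      = (l.filter p).foldl (fun acc x => PySem.List.insertBy (fun a b => decide (key a < key b)) x acc) (acc.filter p) := by
  induction l generalizing acc with
  | nil => simp
  | cons x l ih =>
    simp only [List.foldl_cons, List.filter_cons]
    rw [ih _ (PySem.List.insertBy_pairwise_le key x acc hs)]
    rw [pv_insertBy_filter key p x acc hs]
    by_cases hp : p x = true <;> simp [hp]

-- filter commutes with the whole insertion sort
theorem pv_sorted_filter {α κ : Type} [LinearOrder κ] (key : α → κ) (p : α → Bool)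
    (l : List α) :
    (PySem.List.sorted l key).filter p = PySem.List.sorted (l.filter p) key := by
  rw [PySem.List.sorted_eq_foldl_insertBy, PySem.List.sorted_eq_foldl_insertBy]
  simpa using pv_foldl_filter key p l [] (by simp)

theorem pv_foldl_const {α κ : Type} [LinearOrder κ] (key : α → κ) (s : κ) (l acc : List α)
    (h : ∀ x ∈ l, key x = s) (hacc : ∀ x ∈ acc, key x = s) :
    l.foldl (fun acc x => PySem.List.insertBy (fun a b => decide (key a < key b)) x acc) acc
      = acc ++ l := by
  induction l generalizing acc with
  | nil => simp
  | cons x l ih =>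
    simp only [List.foldl_cons]
    rw [PySem.List.insertBy_of_forall_not_before]
    · rw [ih _ (fun y hy => h y (by simp [hy])) (by
        intro y hy
        rcases List.mem_append.mp hy with hy | hy
        · exact hacc y hy
        · simp only [List.mem_singleton] at hy; subst hy; exact h y (by simp))]
      simp
    · intro y hy
      simp [hacc y hy, h x (by simp)]

-- sorting a constant-key list is the identity (stability)
theorem pv_sorted_const {α κ : Type} [LinearOrder κ] (key : α → κ) (s : κ) (l : List α)
    (h : ∀ x ∈ l, key x = s) :
    PySem.List.sorted l key = l := by
  rw [PySem.List.sorted_eq_foldl_insertBy]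
  simpa using pv_foldl_const key s l [] h (by simp)

theorem pv_insertBy_map {α β κ : Type} [LinearOrder κ] (key : α → κ) (f : β → α)
    (x : β) (acc : List β) :
    (PySem.List.insertBy (fun a b => decide (key (f a) < key (f b))) x acc).map f
      = PySem.List.insertBy (fun a b => decide (key a < key b)) (f x) (acc.map f) := by
  induction acc with
  | nil => rfl
  | cons a as ih =>
    by_cases hlt : key (f x) < key (f a) <;>
      simp [PySem.List.insertBy, hlt, ih]

-- sorting a mapped list = mapping the sorted list (key factored through f)
theorem pv_sorted_map {α β κ : Type} [LinearOrder κ] (key : α → κ) (f : β → α) (l : List β) :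
    PySem.List.sorted (l.map f) key
      = (PySem.List.sorted l (fun b => key (f b))).map f := by
  rw [PySem.List.sorted_eq_foldl_insertBy, PySem.List.sorted_eq_foldl_insertBy]
  have : ∀ (acc : List β),
      (l.foldl (fun acc x => PySem.List.insertBy (fun a b => decide (key (f a) < key (f b))) x acc) acc).map f
      = (l.map f).foldl (fun acc x => PySem.List.insertBy (fun a b => decide (key a < key b)) x acc) (acc.map f) := by
    intro acc
    induction l generalizing acc with
    | nil => simp
    | cons x l ih => simp only [List.foldl_cons, List.map_cons]; rw [ih, pv_insertBy_map]
  simpa using (this []).symm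

-- a key-sorted list splits into its minimal-key prefix and the rest
theorem pv_sorted_split {α κ : Type} [LinearOrder κ] (key : α → κ) (s : κ) (r : List α)
    (hs : r.Pairwise (fun a b => key a ≤ key b)) (hlo : ∀ x ∈ r, s ≤ key x) :
    r = r.filter (fun x => decide (key x = s)) ++ r.filter (fun x => !decide (key x = s)) := by
  induction r with
  | nil => simp
  | cons x r ih =>
    rcases List.pairwise_cons.mp hs with ⟨hx, hr⟩
    by_cases hxs : key x = s
    · simp only [List.filter_cons, hxs, decide_true, Bool.not_true, Bool.false_eq_true, if_false,
        if_true, List.cons_append]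
      exact congrArg (x :: ·) (ih hr (fun y hy => hlo y (by simp [hy])))
    · have hlt : s < key x := lt_of_le_of_ne (hlo x (by simp)) (Ne.symm hxs)
      have hnone : ∀ y ∈ x :: r, ¬ (key y = s) := by
        intro y hy
        rcases List.mem_cons.mp hy with rfl | hy
        · exact hxs
        · exact fun h => absurd (lt_of_lt_of_le hlt (hx y hy)) (by simp [h])
      have h1 : (x :: r).filter (fun x => decide (key x = s)) = [] := by
        simp only [List.filter_eq_nil_iff]
        intro y hy; simpa using hnone y hy
      have h2 : (x :: r).filter (fun x => !decide (key x = s)) = x :: r := by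
        rw [List.filter_eq_self]
        intro y hy; simpa using hnone y hy
      rw [h1, h2, List.nil_append]

-- a key-sorted list is the concatenation of its key-groups, taken over any
-- strictly increasing list of keys covering all keys present
theorem pv_sorted_group {α κ : Type} [LinearOrder κ] (key : α → κ) (ss : List κ) (r : List α)
    (hss : ss.Pairwise (· < ·)) (hcov : ∀ x ∈ r, key x ∈ ss)
    (hs : r.Pairwise (fun a b => key a ≤ key b)) :
    r = ss.flatMap (fun s => r.filter (fun x => decide (key x = s))) := by
  induction ss generalizing r with
  | nil =>
    cases r with
    | nil => simp
    | cons x r => exact absurd (hcov x (by simp)) (by simp)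
  | cons s ss ih =>
    rcases List.pairwise_cons.mp hss with ⟨hsmin, hss'⟩
    have hlo : ∀ x ∈ r, s ≤ key x := by
      intro x hx
      rcases List.mem_cons.mp (hcov x hx) with h | h
      · exact le_of_eq h.symm
      · exact le_of_lt (hsmin _ h)
    have hsplit := pv_sorted_split key s r hs hlo
    simp only [List.flatMap_cons]
    have hcov2 : ∀ x ∈ r.filter (fun x => !decide (key x = s)), key x ∈ ss := by
      intro x hx
      rcases List.mem_filter.mp hx with ⟨hxr, hne⟩
      rcases List.mem_cons.mp (hcov x hxr) with h | h
      · simp [h] at hne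
      · exact h
    have := ih (r.filter (fun x => !decide (key x = s))) hss' hcov2 (hs.filter _)
    conv_lhs => rw [hsplit]
    congr 1
    rw [this]
    apply List.flatMap_congr
    intro t ht
    rw [List.filter_filter]
    apply List.filter_congr
    intro x hx
    by_cases hxt : key x = t
    · simp only [hxt, decide_true, Bool.true_and, Bool.and_true, Bool.not_eq_eq_eq_not,
        Bool.not_true, decide_eq_false_iff_not, decide_eq_true_eq]
      exact fun h => (hsmin t ht).ne' (by simpa using h)
    · simp [hxt]

-- one-step unfoldings of split₀.go (definitional)
theorem pv_go_nil (cur : List Char) (acc : List (List Char)) :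
    PySem.Chars.split₀.go [] cur acc
      = if cur.isEmpty then acc.reverse else (cur.reverse :: acc).reverse := rfl

theorem pv_go_cons (c : Char) (rest cur : List Char) (acc : List (List Char)) :
    PySem.Chars.split₀.go (c :: rest) cur acc
      = if PySem.Chars.isspace c then
          (if cur.isEmpty then PySem.Chars.split₀.go rest [] acc
           else PySem.Chars.split₀.go rest [] (cur.reverse :: acc))
        else PySem.Chars.split₀.go rest (c :: cur) acc := rfl

-- split₀.go on all-whitespace input just closes the accumulator
theorem pv_go_space (sp : List Char) (acc : List (List Char))
    (h : ∀ c ∈ sp, PySem.Chars.isspace c = true) :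
    PySem.Chars.split₀.go sp [] acc = acc.reverse := by
  induction sp generalizing acc with
  | nil => simp [pv_go_nil]
  | cons c sp ih =>
    rw [pv_go_cons, if_pos (h c (by simp)), if_pos (by simp)]
    exact ih acc (fun c hc => h c (by simp [hc]))

-- split₀.go ignores an all-whitespace suffix
theorem pv_go_append_space (t sp : List Char) (cur : List Char) (acc : List (List Char))
    (h : ∀ c ∈ sp, PySem.Chars.isspace c = true) :
    PySem.Chars.split₀.go (t ++ sp) cur acc = PySem.Chars.split₀.go t cur acc := by
  induction t generalizing cur acc with
  | nil =>
    simp only [List.nil_append]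
    cases sp with
    | nil => rfl
    | cons c sp =>
      rw [pv_go_cons, if_pos (h c (by simp)), pv_go_nil]
      by_cases hcur : cur.isEmpty = true
      · rw [if_pos hcur, if_pos hcur, pv_go_space sp acc (fun c hc => h c (by simp [hc]))]
      · rw [if_neg hcur, if_neg hcur, pv_go_space sp _ (fun c hc => h c (by simp [hc]))]
  | cons c t ih =>
    rw [List.cons_append, pv_go_cons, pv_go_cons]
    by_cases hsp : PySem.Chars.isspace c = true
    · rw [if_pos hsp, if_pos hsp]
      by_cases hcur : cur.isEmpty = true
      · rw [if_pos hcur, if_pos hcur, ih [] acc]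
      · rw [if_neg hcur, if_neg hcur, ih [] _]
    · rw [if_neg hsp, if_neg hsp]
      exact ih (c :: cur) acc

-- python's str.split() ignores leading and trailing whitespace
theorem pv_split₀_strip (cs : List Char) :
    PySem.Chars.split₀ (PySem.Chars.strip cs) = PySem.Chars.split₀ cs := by
  unfold PySem.Chars.strip PySem.Chars.split₀
  have hl : ∀ ds : List Char,
      PySem.Chars.split₀.go (PySem.Chars.lstrip ds) [] [] = PySem.Chars.split₀.go ds [] [] := by
    intro ds
    induction ds with
    | nil => rfl
    | cons c ds ih =>
      by_cases hc : PySem.Chars.isspace c = true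
      · rw [show PySem.Chars.lstrip (c :: ds) = PySem.Chars.lstrip ds by
          simp [PySem.Chars.lstrip, hc]]
        rw [ih, pv_go_cons, if_pos hc, if_pos (by simp)]
      · rw [show PySem.Chars.lstrip (c :: ds) = c :: ds by
          simp [PySem.Chars.lstrip, hc]]
  have hr : PySem.Chars.split₀.go (PySem.Chars.rstrip (PySem.Chars.lstrip cs)) [] []
      = PySem.Chars.split₀.go (PySem.Chars.lstrip cs) [] [] := by
    set ds := PySem.Chars.lstrip cs with hds
    have hsplit : ds = PySem.Chars.rstrip ds
        ++ (ds.reverse.takeWhile PySem.Chars.isspace).reverse := by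
      unfold PySem.Chars.rstrip
      rw [← List.reverse_append, List.takeWhile_append_dropWhile, List.reverse_reverse]
    conv_rhs => rw [hsplit]
    rw [pv_go_append_space]
    intro c hc
    rw [List.mem_reverse] at hc
    exact List.mem_takeWhile_imp hc
  rw [hr, hl]

theorem pv_str_split₀_strip (s : String) :
    PySem.Str.split₀ (PySem.Str.strip s) = PySem.Str.split₀ s := by
  simp [PySem.Str.split₀, PySem.Str.strip, pv_split₀_strip]

-- every token produced by split() is nonempty and whitespace-free
theorem pv_go_tokens (s cur : List Char) (acc : List (List Char))
    (hacc : ∀ t ∈ acc, t ≠ [] ∧ ∀ c ∈ t, PySem.Chars.isspace c = false)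
    (hcur : ∀ c ∈ cur, PySem.Chars.isspace c = false) :
    ∀ t ∈ PySem.Chars.split₀.go s cur acc, t ≠ [] ∧ ∀ c ∈ t, PySem.Chars.isspace c = false := by
  induction s generalizing cur acc with
  | nil =>
    rw [pv_go_nil]
    by_cases hc : cur.isEmpty = true
    · rw [if_pos hc]; intro t ht; exact hacc t (by simpa using ht)
    · rw [if_neg hc]
      intro t ht
      rw [List.mem_reverse, List.mem_cons] at ht
      rcases ht with rfl | ht
      · constructor
        · simpa [List.isEmpty_iff] using hc
        · intro c hc'; exact hcur c (by simpa using hc')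
      · exact hacc t ht
  | cons c s ih =>
    rw [pv_go_cons]
    by_cases hsp : PySem.Chars.isspace c = true
    · rw [if_pos hsp]
      by_cases hc : cur.isEmpty = true
      · rw [if_pos hc]; exact ih [] acc hacc (by simp)
      · rw [if_neg hc]
        refine ih [] _ ?_ (by simp)
        intro t ht
        rcases List.mem_cons.mp ht with rfl | ht
        · exact ⟨by simpa [List.isEmpty_iff] using hc,
            fun d hd => hcur d (by simpa using hd)⟩
        · exact hacc t ht
    · rw [if_neg hsp]
      refine ih (c :: cur) acc hacc ?_
      intro d hd
      rcases List.mem_cons.mp hd with rfl | hd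
      · simpa using hsp
      · exact hcur d hd

theorem pv_split₀_tokens (cs : List Char) :
    ∀ t ∈ PySem.Chars.split₀ cs, t ≠ [] ∧ ∀ c ∈ t, PySem.Chars.isspace c = false :=
  pv_go_tokens cs [] [] (by simp) (by simp)

theorem pv_rstrip_last (a : List Char) (c : Char) (hc : PySem.Chars.isspace c = false) :
    PySem.Chars.rstrip (a ++ [c]) = a ++ [c] := by
  unfold PySem.Chars.rstrip
  rw [List.reverse_append]
  simp [hc]

-- the space-join of nonempty tokens ends in a non-space character
theorem pv_join_end (parts : List (List Char)) (hne : parts ≠ [])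
    (h : ∀ t ∈ parts, t ≠ [] ∧ ∀ c ∈ t, PySem.Chars.isspace c = false) :
    ∃ a c, PySem.Chars.join [' '] parts = a ++ [c] ∧ PySem.Chars.isspace c = false := by
  induction parts with
  | nil => exact absurd rfl hne
  | cons t ts ih =>
    cases ts with
    | nil =>
      rcases h t (by simp) with ⟨ht, hch⟩
      refine ⟨t.dropLast, t.getLast ht, ?_, hch _ (List.getLast_mem ht)⟩
      simp [PySem.Chars.join, List.intercalate, List.dropLast_append_getLast ht]
    | cons u us =>
      rcases ih (by simp) (fun x hx => h x (by simp [List.mem_cons] at hx ⊢; tauto)) with ⟨a, c, hj, hc⟩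
      refine ⟨t ++ ' ' :: a, c, ?_, hc⟩
      have : PySem.Chars.join [' '] (t :: u :: us) = t ++ ' ' :: PySem.Chars.join [' '] (u :: us) := by
        simp [PySem.Chars.join, List.intercalate, List.intersperse]
      rw [this, hj]
      simp

-- a space-joined list of nonempty whitespace-free tokens needs no strip
theorem pv_strip_join (parts : List (List Char))
    (h : ∀ t ∈ parts, t ≠ [] ∧ ∀ c ∈ t, PySem.Chars.isspace c = false) :
    PySem.Chars.strip (PySem.Chars.join [' '] parts) = PySem.Chars.join [' '] parts := by
  cases parts with
  | nil => rfl
  | cons t ts =>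
    have hl : PySem.Chars.lstrip (PySem.Chars.join [' '] (t :: ts))
        = PySem.Chars.join [' '] (t :: ts) := by
      rcases h t (by simp) with ⟨ht, hch⟩
      cases t with
      | nil => exact absurd rfl ht
      | cons b tr =>
        have hb : PySem.Chars.isspace b = false := hch b (by simp)
        have : ∃ r, PySem.Chars.join [' '] ((b :: tr) :: ts) = b :: r := by
          cases ts with
          | nil => exact ⟨tr, by simp [PySem.Chars.join, List.intercalate, List.intersperse]⟩
          | cons u us =>
            refine ⟨tr ++ ' ' :: [' '].intercalate (u :: us), ?_⟩
            simp [PySem.Chars.join, List.intercalate, List.intersperse]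
        rcases this with ⟨r, hr⟩
        rw [hr]
        simp [PySem.Chars.lstrip, hb]
    rcases pv_join_end (t :: ts) (by simp) h with ⟨a, c, hj, hc⟩
    unfold PySem.Chars.strip
    rw [hl, hj, pv_rstrip_last a c hc]

theorem pv_str_strip_join (L : List String)
    (hmem : ∀ t ∈ L.map String.toList, t ≠ [] ∧ ∀ c ∈ t, PySem.Chars.isspace c = false) :
    PySem.Str.strip (PySem.Str.join " " L) = PySem.Str.join " " L := by
  rw [PySem.Str.join, PySem.Str.strip]
  rw [show (" " : String).toList = [' '] from rfl]
  congr 1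
  rw [show (String.ofList (PySem.Chars.join [' '] (L.map String.toList))).toList
      = PySem.Chars.join [' '] (L.map String.toList) by simp]
  exact pv_strip_join (L.map String.toList) hmem

-- A's output is: strip(join(sorted-by-digit-sum of the lexicographically sorted tokens))
theorem pv_A_char (string : String) :
    order_weight string
      = PySem.Str.strip (PySem.Str.join " "
          (PySem.List.sorted
            (PySem.List.sorted (PySem.Str.split₀ string) id) pvDigitSum)) := by
  unfold order_weight
  dsimp only
  rw [pv_str_split₀_strip]
  set ws := PySem.List.sorted (PySem.Str.split₀ string) id with hws
  set enum := PySem.List.enumerate ws with henum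
  have hfstnd : (enum.map Prod.fst).Nodup := by
    have := PySem.List.pairwise_lt_enumerate ws 0
    exact (List.pairwise_map.mpr (this.imp (fun h => ne_of_lt h)))
  have hitems : ((enum.foldl (fun d p => d.insert p.1 (pvDigitSum p.2))
      (PySem.Dict.empty : PySem.Dict Int Int)).items)
      = enum.map (fun p => (p.1, pvDigitSum p.2)) := by
    rw [PySem.Dict.items_foldl_insert_fresh enum Prod.fst (fun p => pvDigitSum p.2)
      PySem.Dict.empty (fun a _ => rfl) hfstnd]
    rfl
  rw [hitems]
  have hmap : PySem.List.sorted (enum.map (fun p => (p.1, pvDigitSum p.2))) (fun it => it.2)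
      = (PySem.List.sorted enum (fun q => pvDigitSum q.2)).map (fun p => (p.1, pvDigitSum p.2)) :=
    pv_sorted_map (fun it => it.2) (fun p => (p.1, pvDigitSum p.2)) enum
  rw [hmap]
  set sEnum := PySem.List.sorted enum (fun q => pvDigitSum q.2) with hsE
  have hordnd : ((sEnum.map (fun p => (p.1, pvDigitSum p.2))).map Prod.fst).Nodup := by
    have hperm : (sEnum.map (fun p => (p.1, pvDigitSum p.2))).Perm
        (enum.map (fun p => (p.1, pvDigitSum p.2))) :=
      (PySem.List.sorted_perm enum (fun q => pvDigitSum q.2) false).map _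
    refine (hperm.map Prod.fst).nodup_iff.mpr ?_
    simpa [List.map_map, Function.comp] using hfstnd
  have hordered : (((sEnum.map (fun p => (p.1, pvDigitSum p.2))).foldl
      (fun d kv => d.insert kv.1 kv.2) (PySem.Dict.empty : PySem.Dict Int Int)).keys)
      = (sEnum.map (fun p => (p.1, pvDigitSum p.2))).map Prod.fst := by
    have := PySem.Dict.items_foldl_insert_fresh (sEnum.map (fun p => (p.1, pvDigitSum p.2)))
      Prod.fst Prod.snd PySem.Dict.empty (fun a _ => rfl) hordnd
    simp only [PySem.Dict.keys]
    rw [this]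
    simp [show (PySem.Dict.empty : PySem.Dict Int Int).items = [] from rfl, List.map_map]
  rw [hordered]
  have hout : ((sEnum.map (fun p => (p.1, pvDigitSum p.2))).map Prod.fst).map
      (fun k => (PySem.List.pyGet? ws k).getD "")
      = sEnum.map Prod.snd := by
    rw [List.map_map, List.map_map]
    apply List.map_congr_left
    intro q hq
    have hq' : q ∈ enum :=
      ((PySem.List.sorted_perm enum (fun q => pvDigitSum q.2) false).mem_iff).mp hq
    rw [henum, PySem.List.mem_enumerate_iff] at hq'
    rcases hq' with ⟨k, hk, rfl⟩
    simp [PySem.List.pyGet?_natCast, List.getElem?_eq_getElem hk]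
  rw [hout]
  have hfin : sEnum.map Prod.snd = PySem.List.sorted ws pvDigitSum := by
    have := pv_sorted_map pvDigitSum (Prod.snd : Int × String → String) enum
    rw [PySem.List.map_snd_enumerate] at this
    rw [this, hsE]
  rw [hfin]

-- B's output is: join of the digit-sum groups in increasing key order, each sorted lexicographically
theorem pv_B_char (string : String) :
    order_weight_alt string
      = PySem.Str.join " "
          ((PySem.List.sorted (PySem.Set.ofList ((PySem.Str.split₀ string).map pvDigitSum)) id).flatMap
            (fun s => PySem.List.sorted
              ((PySem.Str.split₀ string).filter (fun w => pvDigitSum w == s)) id)) := by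
  unfold order_weight_alt
  dsimp only
  set toks := PySem.Str.split₀ string with htoks
  set buckets := toks.foldl
      (fun d w => d.modify (pvDigitSum w) [] (fun l => l ++ [w]))
      (PySem.Dict.empty : PySem.Dict Int (List String)) with hbuckets
  have hkeys : buckets.keys = PySem.Set.ofList (toks.map pvDigitSum) := by
    rw [hbuckets, PySem.Dict.keys_foldl_modify_key toks pvDigitSum []
      (fun _ w => fun l => l ++ [w]) PySem.Dict.empty]
    rfl
  have hgetD : ∀ s : Int, buckets.getD s [] = toks.filter (fun w => pvDigitSum w == s) := by
    intro s
    have hfm : buckets = (toks.map (fun w => (pvDigitSum w, w))).foldl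
        (fun d p => d.modify p.1 [] (fun l => l ++ [p.2]))
        (PySem.Dict.empty : PySem.Dict Int (List String)) := by
      rw [hbuckets, List.foldl_map]
    rw [hfm, PySem.Dict.getD_foldl_modify_append]
    rw [show (PySem.Dict.empty : PySem.Dict Int (List String)).getD s [] = [] from rfl]
    rw [List.nil_append, List.filter_map, List.map_map]
    rw [show ((fun (x : Int × String) => x.2) ∘ fun w => (pvDigitSum w, w)) = id from rfl,
      List.map_id]
    rfl
  rw [PySem.List.foldl_append_eq_flatMap, List.nil_append, hkeys]
  congr 1
  apply List.flatMap_congr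
  intro s _
  rw [hgetD s]

-- ===== VERDICT (by name: the statement is the Claim_ definition above) =====
set_option maxHeartbeats 1000000 in
theorem order_weight_spec : Claim_equal_order_weight := by
  unfold Claim_equal_order_weight
  intro string _ _
  unfold Spec_order_weight
  rw [pv_A_char, pv_B_char]
  set toks := PySem.Str.split₀ string with htoks
  set ws := PySem.List.sorted toks id with hws
  set ss := PySem.List.sorted (PySem.Set.ofList (toks.map pvDigitSum)) id with hss
  have hssPerm := PySem.List.sorted_perm (PySem.Set.ofList (toks.map pvDigitSum)) (id : Int → Int) false
  have hsslt : ss.Pairwise (· < ·) := by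
    have h1 : ss.Pairwise (fun a b => a ≤ b) :=
      PySem.List.sorted_pairwise (PySem.Set.ofList (toks.map pvDigitSum)) (id : Int → Int)
    have h2 : ss.Nodup := hssPerm.nodup_iff.mpr (PySem.Set.nodup_ofList _)
    exact (h1.and h2).imp (fun h => lt_of_le_of_ne h.1 h.2)
  have hr : PySem.List.sorted ws pvDigitSum
      = ss.flatMap (fun s => PySem.List.sorted (toks.filter (fun w => pvDigitSum w == s)) id) := by
    have hcov : ∀ x ∈ PySem.List.sorted ws pvDigitSum, pvDigitSum x ∈ ss := by
      intro x hx
      have hx1 : x ∈ ws := (PySem.List.sorted_perm ws pvDigitSum false).mem_iff.mp hx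
      have hx2 : x ∈ toks := (PySem.List.sorted_perm toks id false).mem_iff.mp hx1
      exact hssPerm.mem_iff.mpr ((PySem.Set.mem_ofList _ _).mpr (List.mem_map_of_mem hx2))
    have hgrp := pv_sorted_group pvDigitSum ss (PySem.List.sorted ws pvDigitSum) hsslt hcov
      (PySem.List.sorted_pairwise ws pvDigitSum)
    rw [hgrp]
    apply List.flatMap_congr
    intro s _
    have hbeq : (fun x => decide (pvDigitSum x = s)) = (fun w => pvDigitSum w == s) := by
      funext x
      by_cases h : pvDigitSum x = s <;> simp [h]
    rw [hbeq, pv_sorted_filter pvDigitSum (fun w => pvDigitSum w == s) ws]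
    rw [pv_sorted_const pvDigitSum s (ws.filter (fun w => pvDigitSum w == s))
      (fun x hx => by simpa using (List.mem_filter.mp hx).2)]
    rw [hws, pv_sorted_filter id (fun w => pvDigitSum w == s) toks]
  rw [hr]
  apply pv_str_strip_join
  intro t ht
  rcases List.mem_map.mp ht with ⟨x, hx, rfl⟩
  rcases List.mem_flatMap.mp hx with ⟨s, _, hxs⟩
  have hx1 : x ∈ toks.filter (fun w => pvDigitSum w == s) :=
    (PySem.List.sorted_perm _ id false).mem_iff.mp hxs
  have hx2 : x ∈ toks := (List.mem_filter.mp hx1).1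
  rw [htoks, PySem.Str.split₀] at hx2
  rcases List.mem_map.mp hx2 with ⟨u, hu, rfl⟩
  have := pv_split₀_tokens string.toList u hu
  simpa using this
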